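-- pv_equiv track=rewrite | github.com/pauloeduardodealmeidasantos/projecteuler | prbl119.py | FindPowerSumOfDigits
-- ===== SOURCE A (Python) =====
-- def FindPowerSumOfDigits(n):
-- 	s=sum([int(x) for x in str(n)])
-- 	i=0
-- 	while(s!=1 and s**i < n):
-- 		i+=1
-- 	if(s**i==n):
-- 		return i
-- 	else:
-- 		return -1
-- ===== SOURCE B (Python) =====
-- def FindPowerSumOfDigits(n):
--     s = sum(int(x) for x in str(n))
--     if s == 1:
--         return 0 if n == 1 else -1
--     if s == 0:
--         return -1
--     i = 0
--     while n % s == 0: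
--         n //= s
--         i += 1
--     return i if n == 1 else -1
-- ===== Notes on version B (the rewrite author's own statement) =====
-- stated objective: alternative
-- what changed: Instead of growing s**i step by step until it reaches or passes n and then comparing, B repeatedly divides n by the digit sum s (with explicit guards for s == 1 and s == 0) and checks that the remainder chain ends at 1.
import Mathlib
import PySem

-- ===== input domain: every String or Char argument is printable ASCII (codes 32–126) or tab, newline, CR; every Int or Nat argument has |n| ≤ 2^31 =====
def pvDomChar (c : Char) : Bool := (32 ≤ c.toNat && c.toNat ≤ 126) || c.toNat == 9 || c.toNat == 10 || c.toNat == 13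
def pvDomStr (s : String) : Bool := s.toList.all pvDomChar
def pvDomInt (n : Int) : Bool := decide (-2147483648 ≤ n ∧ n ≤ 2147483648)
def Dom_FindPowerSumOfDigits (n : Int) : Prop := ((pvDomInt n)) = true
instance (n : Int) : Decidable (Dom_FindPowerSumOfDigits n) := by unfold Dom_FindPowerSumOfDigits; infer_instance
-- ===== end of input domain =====

-- B replaces A's  "grow s**i until it reaches n"  search by repeatedly dividing n by s
-- (same digit-sum s); objective: alternative algorithm of similar cost.

-- ===== PORT A =====
-- s = sum([int(x) for x in str(n)])  — shared by both ports, it is the same Python line in both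
-- (exact: str(n) = PySem.Int.toChars n, int(x) on a one-char string = PySem.Int.ofChars? [c];
--  none = ValueError, excluded by Pre_)
def digitSum? (n : Int) : Option Int :=
  match (PySem.Int.toChars n).mapM (fun c => PySem.Int.ofChars? [c]) with
  | none => none
  | some vs => some vs.sum

-- while s != 1 and s**i < n: i += 1   (fuel n.toNat+1 is enough: see loopA lemmas below)
def loopA (s n : Int) : Nat → Nat → Nat
  | 0, i => i
  | f+1, i => if s ≠ 1 ∧ s ^ i < n then loopA s n f (i+1) else i

def FindPowerSumOfDigits (n : Int) : Int :=
  match digitSum? n with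
  | none => -1        -- Python raises ValueError here (n < 0); excluded by Pre_
  | some s =>
    let i := loopA s n (n.toNat + 1) 0
    if s ^ i = n then (i : Int) else -1

-- ===== PORT B =====
-- while n % s == 0: n //= s; i += 1; then: i if n == 1 else -1
-- (fuel n.toNat+1 is enough: n shrinks at every division; see loopB lemmas below)
def loopB (s : Int) : Nat → Int → Int → Int
  | 0, m, i => if m = 1 then i else -1
  | f+1, m, i =>
    if PySem.Int.mod m s = 0 then loopB s f (PySem.Int.floordiv m s) (i+1)
    else if m = 1 then i else -1

def FindPowerSumOfDigits_alt (n : Int) : Int :=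
  match digitSum? n with
  | none => -1        -- Python raises ValueError here (n < 0); excluded by Pre_
  | some s =>
    if s = 1 then (if n = 1 then 0 else -1)
    else if s = 0 then -1
    else loopB s (n.toNat + 1) n 0

-- ===== PRECONDITION & SPEC =====
-- Pre_: on n < 0, str(n) starts with '-' and int('-') raises ValueError in both A and B.
def Pre_FindPowerSumOfDigits (n : Int) : Prop := 0 ≤ n
instance (n : Int) : Decidable (Pre_FindPowerSumOfDigits n) := by unfold Pre_FindPowerSumOfDigits; infer_instance
def pvWitness_FindPowerSumOfDigits : Int := (81)

def Spec_FindPowerSumOfDigits (n : Int) (out : Int) : Prop := out = FindPowerSumOfDigits_alt n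
instance (n : Int) (out : Int) : Decidable (Spec_FindPowerSumOfDigits n out) := by unfold Spec_FindPowerSumOfDigits; infer_instance

-- ===== CLAIM (what is proved, stated in full; the proofs are below) =====
def Claim_equal_FindPowerSumOfDigits : Prop := ∀ (n : Int), Dom_FindPowerSumOfDigits n → Pre_FindPowerSumOfDigits n → Spec_FindPowerSumOfDigits n (FindPowerSumOfDigits n)

-- ===== LEMMAS AND PROOFS =====

-- every char str(n) produces for n ≥ 0 is a decimal digit
def pvDigits : List Char := ['0','1','2','3','4','5','6','7','8','9']

theorem mem_toDigitsCore (f n : Nat) (ds : List Char) (hds : ∀ c ∈ ds, c ∈ pvDigits) :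
    ∀ c ∈ Nat.toDigitsCore 10 f n ds, c ∈ pvDigits := by
  induction f generalizing n ds with
  | zero => simpa [Nat.toDigitsCore] using hds
  | succ f ih =>
    have hd : (n % 10).digitChar ∈ pvDigits := by
      have h10 : n % 10 < 10 := Nat.mod_lt n (by norm_num)
      have : ∀ r, r < 10 → r.digitChar ∈ pvDigits := by decide
      exact this _ h10
    have hcons : ∀ c ∈ (n % 10).digitChar :: ds, c ∈ pvDigits := by
      intro c hc
      rcases List.mem_cons.mp hc with rfl | hc
      · exact hd
      · exact hds _ hc
    simp only [Nat.toDigitsCore]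
    split
    · exact hcons
    · exact ih _ _ hcons

theorem digit_char_val_nonneg (c : Char) (hc : c ∈ pvDigits) (v : Int)
    (h : PySem.Int.ofChars? [c] = some v) : 0 ≤ v := by
  have key : 0 ≤ (PySem.Int.ofChars? [c]).getD 0 := by
    unfold pvDigits at hc
    fin_cases hc <;> decide
  rw [h] at key
  simpa using key

theorem mapM_sum_nonneg (cs : List Char) (hcs : ∀ c ∈ cs, c ∈ pvDigits) :
    ∀ vs, cs.mapM (fun c => PySem.Int.ofChars? [c]) = some vs → 0 ≤ vs.sum := by
  induction cs with
  | nil =>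
    intro vs h
    simp only [List.mapM_nil, pure, Option.some.injEq] at h
    simp [← h]
  | cons c cs ih =>
    intro vs h
    simp only [List.mapM_cons] at h
    cases hv : PySem.Int.ofChars? [c] with
    | none => simp [hv] at h
    | some v =>
      cases hrest : cs.mapM (fun c => PySem.Int.ofChars? [c]) with
      | none => simp [hv, hrest] at h
      | some ws =>
        simp [hv, hrest] at h
        have h1 : 0 ≤ v := digit_char_val_nonneg c (hcs c (by simp)) v hv
        have h2 : 0 ≤ ws.sum := ih (fun c hc => hcs c (by simp [hc])) ws hrest
        subst h
        simp only [List.sum_cons]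
        omega

theorem digitSum_nonneg (n : Int) (hn : 0 ≤ n) (s : Int) (h : digitSum? n = some s) : 0 ≤ s := by
  unfold digitSum? at h
  have hch : (PySem.Int.toChars n) = Nat.toDigits 10 n.toNat := by
    simp [PySem.Int.toChars, not_lt.mpr hn]
  rw [hch] at h
  have hmem : ∀ c ∈ Nat.toDigits 10 n.toNat, c ∈ pvDigits := by
    intro c hc
    exact mem_toDigitsCore _ _ [] (by simp) c hc
  cases hm : (Nat.toDigits 10 n.toNat).mapM (fun c => PySem.Int.ofChars? [c]) with
  | none => rw [hm] at h; simp at h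
  | some vs =>
    rw [hm] at h
    simp at h
    subst h
    exact mapM_sum_nonneg _ hmem vs hm

-- ===== loopA lemmas =====

theorem loopA_s_zero (n : Int) (hn : 2 ≤ n) : ∀ f i, loopA 0 n f i = i + f := by
  intro f
  induction f with
  | zero => intro i; simp [loopA]
  | succ f ih =>
    intro i
    have hcond : (0:Int) ^ i < n := by
      cases i with
      | zero => simpa using hn
      | succ j => rw [pow_succ, mul_zero]; omega
    simp only [loopA]
    rw [if_pos (show (0:Int) ≠ 1 ∧ (0:Int) ^ i < n from ⟨by norm_num, hcond⟩), ih]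
    omega

theorem loopA_s_one (n : Int) : ∀ f, loopA 1 n (f+1) 0 = 0 := by
  intro f; simp [loopA]

theorem loopA_min (s n : Int) (hs : 2 ≤ s) (k : Nat) (hk : n ≤ s ^ k)
    (hk' : ∀ j < k, s ^ j < n) : ∀ f i, i ≤ k → k ≤ i + f → loopA s n f i = k := by
  intro f
  induction f with
  | zero => intro i h1 h2; simp only [loopA]; omega
  | succ f ih =>
    intro i h1 h2
    by_cases hik : i = k
    · subst hik
      simp only [loopA]
      rw [if_neg (show ¬ (s ≠ 1 ∧ s ^ i < n) from fun hcon => absurd hcon.2 (not_lt.mpr hk))]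
    · have hlt : i < k := lt_of_le_of_ne h1 hik
      have hcond : s ^ i < n := hk' i hlt
      simp only [loopA]
      rw [if_pos (show s ≠ 1 ∧ s ^ i < n from ⟨by omega, hcond⟩)]
      exact ih (i+1) (by omega) (by omega)

-- ===== loopB lemmas =====

theorem loopB_pow (s : Int) (hs : 2 ≤ s) :
    ∀ (e : Nat) (f : Nat) (i : Int), e < f → loopB s f (s ^ e) i = i + e := by
  intro e
  induction e with
  | zero =>
    intro f i hf
    obtain ⟨f', rfl⟩ : ∃ f', f = f' + 1 := ⟨f - 1, by omega⟩
    have hmod : PySem.Int.mod 1 s ≠ 0 := by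
      rw [Ne, PySem.Int.mod_eq_zero_iff_dvd]
      intro hdvd
      have := Int.le_of_dvd (by norm_num) hdvd
      omega
    simp [loopB, hmod]
  | succ e ih =>
    intro f i hf
    obtain ⟨f', rfl⟩ : ∃ f', f = f' + 1 := ⟨f - 1, by omega⟩
    have hdvd : s ∣ s ^ (e+1) := dvd_pow_self s (by omega)
    have hmod : PySem.Int.mod (s ^ (e+1)) s = 0 := (PySem.Int.mod_eq_zero_iff_dvd _ _).mpr hdvd
    have hpos : (0:Int) < s := by omega
    have hdiv : PySem.Int.floordiv (s ^ (e+1)) s = s ^ e := by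
      rw [PySem.Int.floordiv_eq_ediv_of_pos hpos, pow_succ, Int.mul_ediv_cancel _ (by omega)]
    simp only [loopB, if_pos hmod, hdiv]
    rw [ih f' (i+1) (by omega)]
    push_cast
    ring

theorem loopB_nopow (s : Int) (hs : 2 ≤ s) :
    ∀ (f : Nat) (m i : Int), 1 ≤ m → m ≤ (f : Int) → (∀ e : Nat, m ≠ s ^ e) →
      loopB s f m i = -1 := by
  intro f
  induction f with
  | zero => intro m i h1 h2 _; exfalso; simp at h2; omega
  | succ f ih =>
    intro m i h1 h2 hnp
    have hm1 : m ≠ 1 := by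
      intro h; exact hnp 0 (by simpa using h)
    by_cases hmod : PySem.Int.mod m s = 0
    · have hdvd : s ∣ m := (PySem.Int.mod_eq_zero_iff_dvd _ _).mp hmod
      have hpos : (0:Int) < s := by omega
      have hdiveq : PySem.Int.floordiv m s = m / s := PySem.Int.floordiv_eq_ediv_of_pos hpos
      have hms : s ≤ m := Int.le_of_dvd (by omega) hdvd
      have hq1 : 1 ≤ m / s := by
        rw [Int.le_div_iff_of_dvd_of_pos hpos hdvd]; omega
      have hqlt : m / s < m := by
        rw [Int.div_lt_iff_of_dvd_of_pos hpos hdvd]; nlinarith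
      have hrec : m = s * (m / s) := (Int.mul_ediv_cancel' hdvd).symm
      have hnp' : ∀ e : Nat, m / s ≠ s ^ e := by
        intro e he
        exact hnp (e+1) (by rw [hrec, he, pow_succ]; ring)
      simp only [loopB, if_pos hmod, hdiveq]
      exact ih (m / s) (i+1) hq1 (by push_cast at h2 ⊢; omega) hnp'
    · simp [loopB, hmod, hm1]

-- the least exponent k with n ≤ s^k (used to evaluate loopA)
theorem exists_pow_ge (s n : Int) (hs : 2 ≤ s) (hn : 0 ≤ n) : n ≤ s ^ n.toNat := by
  calc n ≤ (2:Int) ^ n.toNat := by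
        have h1 : n.toNat < 2 ^ n.toNat := Nat.lt_two_pow_self
        have : (n.toNat : Int) < (2:Int) ^ n.toNat := by exact_mod_cast h1
        omega
    _ ≤ s ^ n.toNat := pow_le_pow_left₀ (by norm_num) (by omega) _

-- ===== main case: s ≥ 2, n ≥ 2 =====

theorem main_case (s n : Int) (hs : 2 ≤ s) (hn : 2 ≤ n) :
    (if s ^ (loopA s n (n.toNat + 1) 0) = n then ((loopA s n (n.toNat + 1) 0 : Nat) : Int) else -1)
      = loopB s (n.toNat + 1) n 0 := by
  have hP : ∃ k : Nat, n ≤ s ^ k := ⟨n.toNat, exists_pow_ge s n hs (by omega)⟩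
  let k := Nat.find hP
  have hk : n ≤ s ^ k := Nat.find_spec hP
  have hk' : ∀ j < k, s ^ j < n := by
    intro j hj
    have := Nat.find_min hP hj
    omega
  have hkle : k ≤ n.toNat := Nat.find_le (exists_pow_ge s n hs (by omega))
  have hA : loopA s n (n.toNat + 1) 0 = k := loopA_min s n hs k hk hk' _ 0 (by omega) (by omega)
  by_cases hpow : ∃ e : Nat, n = s ^ e
  · obtain ⟨e, he⟩ := hpow
    have hke : k = e := by
      have h1 : k ≤ e := Nat.find_le he.le
      rcases lt_or_eq_of_le h1 with h | h
      · exfalso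
        have hlt : s ^ k < s ^ e := Int.pow_lt_pow_of_lt hs h
        rw [← he] at hlt
        omega
      · exact h
    have hef : e < n.toNat + 1 := by
      have h1 : (e:Int) < 2 ^ e := by exact_mod_cast Nat.lt_two_pow_self
      have h2 : (2:Int) ^ e ≤ s ^ e := pow_le_pow_left₀ (by norm_num) hs e
      omega
    have hB := loopB_pow s hs e (n.toNat + 1) 0 hef
    rw [← he] at hB
    rw [hA, hke, ← he, if_pos rfl, hB]
    simp
  · push Not at hpow
    have hne : s ^ k ≠ n := fun h => hpow k h.symm
    rw [hA, if_neg hne, loopB_nopow s hs _ n 0 (by omega) (by omega) (fun e he => hpow e he)]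

-- ===== VERDICT (by name: the statement is the Claim_ definition above) =====
set_option maxRecDepth 8192 in
theorem FindPowerSumOfDigits_spec : Claim_equal_FindPowerSumOfDigits := by
  intro n _ hpre
  unfold Spec_FindPowerSumOfDigits Pre_FindPowerSumOfDigits at *
  by_cases h0 : n = 0
  · subst h0; decide
  by_cases h1 : n = 1
  · subst h1; decide
  have hn : 2 ≤ n := by omega
  unfold FindPowerSumOfDigits FindPowerSumOfDigits_alt
  cases hds : digitSum? n with
  | none => rfl
  | some s =>
    have hs0 : 0 ≤ s := digitSum_nonneg n hpre s hds
    show (if s ^ (loopA s n (n.toNat + 1) 0) = n then ((loopA s n (n.toNat + 1) 0 : Nat) : Int) else -1)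
        = (if s = 1 then (if n = 1 then (0:Int) else -1) else if s = 0 then -1 else loopB s (n.toNat + 1) n 0)
    by_cases hs1 : s = 1
    · subst hs1
      rw [loopA_s_one n n.toNat, pow_zero, if_neg (by omega : ¬ (1:Int) = n)]
      simp [h1]
    by_cases hsz : s = 0
    · subst hsz
      rw [loopA_s_zero n hn (n.toNat + 1) 0]
      have hz : (0:Int) ^ (0 + (n.toNat + 1)) = 0 := zero_pow (by omega)
      rw [hz, if_neg (by omega : ¬ (0:Int) = n)]
      norm_num
    · have hs2 : 2 ≤ s := by omega
      rw [if_neg hs1, if_neg hsz]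
      exact main_case s n hs2 hn
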